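-- pv_equiv track=rewrite | github.com/glueckf/INES | src/placement_engine/cost_calculation.py | _expand_to_primitives
-- ===== SOURCE A (Python) =====
-- def _expand_to_primitives(element, combination_dict):
--     """
--     Recursively expand a subquery element to its primitive events.
--
--     Args:
--         element: The element to expand (could be a subquery)
--         combination_dict: Dictionary mapping projections to their combinations
--
--     Returns:
--         List of primitive event strings
--     """
--     if element not in combination_dict:
--         # This is already a primitive event
--         return [str(element)]
--
--     primitives = []
--     for sub_elem in combination_dict[element]:
--         if sub_elem in combination_dict:
--             # Recursively expand this sub-element
--             primitives.extend(_expand_to_primitives(sub_elem, combination_dict))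
--         else:
--             # This is a primitive event
--             primitives.append(str(sub_elem))
--
--     return primitives
-- ===== SOURCE B (Python) =====
-- def _expand_to_primitives(element, combination_dict):
--     """Iterative DFS with an explicit stack instead of recursion."""
--     result = []
--     stack = [element]
--     while stack:
--         node = stack.pop()
--         if node not in combination_dict:
--             result.append(str(node))
--         else:
--             stack.extend(reversed(combination_dict[node]))
--     return result
-- ===== Notes on version B (the rewrite author's own statement) =====
-- stated objective: alternative
-- what changed: Replaced the recursive pre-order expansion by an iterative DFS with an explicit stack (children pushed in reversed order), producing the same leaf list without recursion.
import Mathlib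
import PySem

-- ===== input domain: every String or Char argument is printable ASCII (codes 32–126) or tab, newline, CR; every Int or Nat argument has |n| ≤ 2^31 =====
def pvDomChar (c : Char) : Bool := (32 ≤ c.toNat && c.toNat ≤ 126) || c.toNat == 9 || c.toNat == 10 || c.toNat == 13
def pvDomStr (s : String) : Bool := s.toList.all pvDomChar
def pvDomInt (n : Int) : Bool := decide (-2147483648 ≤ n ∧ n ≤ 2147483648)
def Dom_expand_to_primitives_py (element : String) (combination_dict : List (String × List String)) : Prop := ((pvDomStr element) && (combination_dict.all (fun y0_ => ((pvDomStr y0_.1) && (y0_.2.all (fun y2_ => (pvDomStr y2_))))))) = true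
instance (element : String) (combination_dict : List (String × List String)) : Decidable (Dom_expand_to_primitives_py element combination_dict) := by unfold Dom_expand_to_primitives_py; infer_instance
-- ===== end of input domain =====

-- B replaces A's recursion by an iterative DFS over an explicit stack (children pushed reversed);
-- equality of the returned lists is proved on acyclic combination dicts (on a cycle A's recursion raises).

-- first-match association-list lookup: 'element in combination_dict' / 'combination_dict[element]'
def pvLookup (d : List (String × List String)) (e : String) : Option (List String) :=
  (d.find? (fun p => p.1 == e)).map (·.2)

-- ===== PORT A =====
-- A's recursion, totalized with fuel; on inputs admitted by Pre_ the Python recursion depth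
-- is at most d.length, so fuel d.length + 1 reproduces it exactly.
def pvExpandA (d : List (String × List String)) : Nat → String → List String
  | 0, _ => []
  | n+1, e =>
    match pvLookup d e with
    | none => [e]
    | some vs =>
        vs.foldl (fun acc c =>
          if (pvLookup d c).isSome then acc ++ pvExpandA d n c else acc ++ [c]) []

def expand_to_primitives_py (element : String) (combination_dict : List (String × List String)) : List String :=
  pvExpandA combination_dict (combination_dict.length + 1) element

-- ===== PORT B =====
-- B's while-loop, totalized with fuel; on inputs admitted by Pre_ the loop runs at most
-- (S+1)^(L+1) iterations (S = total number of children, L = number of entries).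
def pvLoopB (d : List (String × List String)) : Nat → List String → List String → List String
  | 0, _, acc => acc
  | _+1, [], acc => acc
  | n+1, x :: rest, acc =>
    match pvLookup d x with
    | none => pvLoopB d n rest (acc ++ [x])
    | some vs => pvLoopB d n (vs ++ rest) acc

def expand_to_primitives_py_alt (element : String) (combination_dict : List (String × List String)) : List String :=
  pvLoopB combination_dict
    (((combination_dict.map (fun p => p.2.length)).sum + 1) ^ (combination_dict.length + 1))
    [element] []

-- ===== PRECONDITION & SPEC =====
def pvKeys (d : List (String × List String)) : List String := d.map Prod.fst

-- one peeling round: keep exactly the keys that still have some child among the remaining keys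
def pvStep (d : List (String × List String)) (rem : List String) : List String :=
  rem.filter (fun k => ((pvLookup d k).getD []).any (fun c => rem.contains c))

-- n rounds of peeling, as plain function iteration
def pvPeel (d : List (String × List String)) (n : Nat) : List String :=
  (pvStep d)^[n] (pvKeys d)

-- Pre_ excludes exactly the inputs on which the expansion starting from element runs into a cycle
-- of the dict: there Python A's recursion raises RecursionError and B's loop never terminates, so
-- neither returns. The set of keys whose expansion is infinite is the residue of the standard
-- peeling (Kahn) procedure on the key graph — a graph property of the input, not a re-run of either
-- port — and Pre_ says element is not in that residue.
def Pre_expand_to_primitives_py (element : String) (combination_dict : List (String × List String)) : Prop :=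
  element ∉ pvPeel combination_dict combination_dict.length

instance (element : String) (combination_dict : List (String × List String)) : Decidable (Pre_expand_to_primitives_py element combination_dict) := by unfold Pre_expand_to_primitives_py; infer_instance

def pvWitness_expand_to_primitives_py : String × (List (String × List String)) :=
  ("AND(A,B)", [("AND(A,B)", ["SEQ(A,C)", "B"]), ("SEQ(A,C)", ["A", "C"])])

def Spec_expand_to_primitives_py (element : String) (combination_dict : List (String × List String)) (out : List String) : Prop := out = expand_to_primitives_py_alt element combination_dict
instance (element : String) (combination_dict : List (String × List String)) (out : List String) : Decidable (Spec_expand_to_primitives_py element combination_dict out) := by unfold Spec_expand_to_primitives_py; infer_instance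

-- ===== CLAIM (what is proved, stated in full; the proofs are below) =====
def Claim_equal_expand_to_primitives_py : Prop := ∀ (element : String) (combination_dict : List (String × List String)), Dom_expand_to_primitives_py element combination_dict → Pre_expand_to_primitives_py element combination_dict → Spec_expand_to_primitives_py element combination_dict (expand_to_primitives_py element combination_dict)

-- ===== LEMMAS AND PROOFS =====

-- rank of a node: how many peeling rounds it survives; strictly decreases along edges
def pvRank (d : List (String × List String)) (e : String) : Nat :=
  (List.range (d.length + 1)).countP (fun n => (pvPeel d n).contains e)

lemma pvLookup_mem (d : List (String × List String)) (e : String) (vs : List String)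
    (h : pvLookup d e = some vs) : ∃ p ∈ d, p.1 = e ∧ p.2 = vs := by
  unfold pvLookup at h
  cases hf : d.find? (fun p => p.1 == e) with
  | none => rw [hf] at h; simp at h
  | some p =>
    rw [hf] at h
    exact ⟨p, List.mem_of_find?_eq_some hf, by simpa using List.find?_some hf, by simpa using h⟩

lemma mem_keys_iff (d : List (String × List String)) (e : String) :
    e ∈ pvKeys d ↔ (pvLookup d e).isSome := by
  constructor
  · intro h
    obtain ⟨p, hp, hfst⟩ := List.mem_map.mp h
    unfold pvLookup
    rw [Option.isSome_map]
    exact List.find?_isSome.mpr ⟨p, hp, by simp [hfst]⟩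
  · intro h
    unfold pvLookup at h
    rw [Option.isSome_map] at h
    obtain ⟨p, hp, hbeq⟩ := List.find?_isSome.mp h
    exact List.mem_map.mpr ⟨p, hp, by simpa using hbeq⟩

lemma pvPeel_succ (d : List (String × List String)) (n : Nat) :
    pvPeel d (n + 1) = pvStep d (pvPeel d n) :=
  Function.iterate_succ_apply' _ _ _

lemma pvPeel_succ_mem (d : List (String × List String)) (n : Nat) (e : String)
    (h : e ∈ pvPeel d (n + 1)) : e ∈ pvPeel d n := by
  rw [pvPeel_succ, pvStep] at h
  exact (List.mem_filter.mp h).1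

lemma pvPeel_down (d : List (String × List String)) (m n : Nat) (hmn : m ≤ n) (e : String)
    (h : e ∈ pvPeel d n) : e ∈ pvPeel d m := by
  induction n with
  | zero => simpa [Nat.le_zero.mp hmn] using h
  | succ n ih =>
    rcases Nat.lt_or_ge m (n + 1) with hlt | hge
    · exact ih (by omega) (pvPeel_succ_mem d n e h)
    · have : m = n + 1 := by omega
      rwa [this]

-- the edge lemma: if c is a child of a key e, then whenever c survives n rounds e survives n+1
lemma pvPeel_edge (d : List (String × List String)) (e : String) (vs : List String)
    (hE : pvLookup d e = some vs) (c : String) (hc : c ∈ vs) :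
    ∀ n, c ∈ pvPeel d n → e ∈ pvPeel d (n + 1) := by
  intro n
  induction n with
  | zero =>
    intro h0
    rw [pvPeel_succ, pvStep]
    refine List.mem_filter.mpr ⟨?_, ?_⟩
    · exact (mem_keys_iff d e).mpr (by simp [hE])
    · simp only [hE, Option.getD_some, List.any_eq_true]
      exact ⟨c, hc, by simpa using h0⟩
  | succ n ih =>
    intro h
    have he : e ∈ pvPeel d (n + 1) := ih (pvPeel_succ_mem d n c h)
    rw [pvPeel_succ, pvStep]
    refine List.mem_filter.mpr ⟨he, ?_⟩
    simp only [hE, Option.getD_some, List.any_eq_true]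
    exact ⟨c, hc, by simpa using h⟩

-- the peeling stabilizes after d.length rounds (each earlier round drops at least one key)
lemma pvPeel_shrink (d : List (String × List String)) :
    ∀ n, (∀ m, m < n → pvPeel d (m + 1) ≠ pvPeel d m) →
      (pvPeel d n).length + n ≤ d.length := by
  intro n
  induction n with
  | zero => simp [pvPeel, pvKeys]
  | succ n ih =>
    intro h
    have hlen : (pvPeel d n).length + n ≤ d.length := ih (fun m hm => h m (by omega))
    have hsub : (pvPeel d (n + 1)).Sublist (pvPeel d n) := by
      rw [pvPeel_succ, pvStep]; exact List.filter_sublist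
    have hne : pvPeel d (n + 1) ≠ pvPeel d n := h n (by omega)
    have hlt : (pvPeel d (n + 1)).length < (pvPeel d n).length := by
      rcases Nat.lt_or_ge (pvPeel d (n + 1)).length (pvPeel d n).length with hlt | hge
      · exact hlt
      · exact absurd (hsub.eq_of_length (by have := hsub.length_le; omega)) hne
    omega

lemma pvPeel_add_of_fix (d : List (String × List String)) (m : Nat)
    (hfix : pvPeel d (m + 1) = pvPeel d m) : ∀ k, pvPeel d (m + k) = pvPeel d m := by
  intro k
  induction k with
  | zero => rfl
  | succ k ih =>
    have : pvPeel d (m + (k + 1)) = pvStep d (pvPeel d (m + k)) := pvPeel_succ d (m + k)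
    rw [this, ih, ← pvPeel_succ, hfix]

lemma pvPeel_stab (d : List (String × List String)) :
    pvPeel d (d.length + 1) = pvPeel d d.length := by
  by_cases h : ∃ m, m ≤ d.length ∧ pvPeel d (m + 1) = pvPeel d m
  · obtain ⟨m, hm, hfix⟩ := h
    have h1 := pvPeel_add_of_fix d m hfix (d.length - m)
    have h2 := pvPeel_add_of_fix d m hfix (d.length + 1 - m)
    have e1 : m + (d.length - m) = d.length := by omega
    have e2 : m + (d.length + 1 - m) = d.length + 1 := by omega
    rw [e1] at h1; rw [e2] at h2
    rw [h1, h2]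
  · exfalso
    push Not at h
    have := pvPeel_shrink d (d.length + 1) (fun m hm => h m (by omega))
    omega

-- the residue (keys surviving d.length rounds) is closed under taking parents; contrapositive:
-- a child of a non-residue key is non-residue
lemma pvChild_not_res (d : List (String × List String)) (e : String) (vs : List String)
    (hres : e ∉ pvPeel d d.length) (hE : pvLookup d e = some vs)
    (c : String) (hc : c ∈ vs) : c ∉ pvPeel d d.length := by
  intro hc'
  exact hres (pvPeel_stab d ▸ pvPeel_edge d e vs hE c hc d.length hc')

lemma countP_range_lt (L k : Nat) :
    (List.range L).countP (fun m => decide (m < k)) = min L k := by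
  induction L with
  | zero => simp
  | succ L ih =>
    rw [List.range_succ, List.countP_append, ih]
    by_cases h : L < k <;> simp [h] <;> omega

lemma pvRank_le_of_not_mem (d : List (String × List String)) (e : String) (n : Nat)
    (h : e ∉ pvPeel d n) : pvRank d e ≤ n := by
  unfold pvRank
  have hmono : ∀ m ∈ List.range (d.length + 1),
      ((pvPeel d m).contains e) = true → decide (m < n) = true := by
    intro m _ hm
    by_contra hlt
    have hnm : n ≤ m := by simpa using hlt
    exact h (pvPeel_down d n m hnm e (by simpa using hm))
  calc (List.range (d.length + 1)).countP (fun m => (pvPeel d m).contains e)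
      ≤ (List.range (d.length + 1)).countP (fun m => decide (m < n)) :=
        List.countP_mono_left hmono
    _ = min (d.length + 1) n := countP_range_lt _ _
    _ ≤ n := min_le_right _ _

lemma mem_of_lt_pvRank (d : List (String × List String)) (e : String) (n : Nat)
    (h : n < pvRank d e) : e ∈ pvPeel d n := by
  by_contra hmem
  exact absurd h (by simpa using pvRank_le_of_not_mem d e n hmem)

lemma lt_pvRank_of_mem (d : List (String × List String)) (e : String)
    (hres : e ∉ pvPeel d d.length) (n : Nat)
    (h : e ∈ pvPeel d n) : n < pvRank d e := by
  have hnL : n < d.length := by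
    by_contra hge
    exact hres (pvPeel_down d d.length n (by omega) e h)
  unfold pvRank
  have hmono : ∀ m ∈ List.range (d.length + 1),
      decide (m < n + 1) = true → ((pvPeel d m).contains e) = true := by
    intro m _ hm
    have : m ≤ n := by simpa [Nat.lt_succ_iff] using hm
    simpa using pvPeel_down d m n this e h
  calc n + 1 = min (d.length + 1) (n + 1) := by omega
    _ = (List.range (d.length + 1)).countP (fun m => decide (m < n + 1)) :=
        (countP_range_lt _ _).symm
    _ ≤ (List.range (d.length + 1)).countP (fun m => (pvPeel d m).contains e) :=
        List.countP_mono_left hmono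

lemma pvRank_le (d : List (String × List String)) (e : String)
    (hres : e ∉ pvPeel d d.length) : pvRank d e ≤ d.length :=
  pvRank_le_of_not_mem d e d.length hres

lemma pvRank_pos_of_some (d : List (String × List String)) (e : String)
    (hres : e ∉ pvPeel d d.length) (vs : List String)
    (h : pvLookup d e = some vs) : 0 < pvRank d e :=
  lt_pvRank_of_mem d e hres 0 ((mem_keys_iff d e).mpr (by simp [h]))

lemma pvLookup_none_of_rank_zero (d : List (String × List String)) (e : String)
    (hres : e ∉ pvPeel d d.length)
    (h : pvRank d e = 0) : pvLookup d e = none := by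
  cases hl : pvLookup d e with
  | none => rfl
  | some vs => exact absurd h (Nat.pos_iff_ne_zero.mp (pvRank_pos_of_some d e hres vs hl))

-- the rank strictly decreases from a non-residue key to each of its children
lemma pvRank_child_lt (d : List (String × List String)) (e : String)
    (hres : e ∉ pvPeel d d.length) (vs : List String) (h : pvLookup d e = some vs)
    (c : String) (hc : c ∈ vs) : pvRank d c < pvRank d e := by
  cases hrc : pvRank d c with
  | zero => exact pvRank_pos_of_some d e hres vs h
  | succ m =>
    have hcm : c ∈ pvPeel d m := mem_of_lt_pvRank d c m (by omega)
    have hem : e ∈ pvPeel d (m + 1) := pvPeel_edge d e vs h c hc m hcm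
    have := lt_pvRank_of_mem d e hres (m + 1) hem
    omega

-- reference expansion and iteration count, at exactly-sufficient fuel
def pvE (d : List (String × List String)) (e : String) : List String :=
  pvExpandA d (pvRank d e + 1) e

def pvSizeA (d : List (String × List String)) : Nat → String → Nat
  | 0, _ => 0
  | n+1, e =>
    match pvLookup d e with
    | none => 1
    | some vs => 1 + (vs.map (pvSizeA d n)).sum

def pvSize (d : List (String × List String)) (e : String) : Nat :=
  pvSizeA d (pvRank d e + 1) e

-- one-step unfolding equations (rfl), to unfold exactly one fuel layer
lemma pvExpandA_succ (d : List (String × List String)) (m : Nat) (e : String) :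
    pvExpandA d (m + 1) e =
      match pvLookup d e with
      | none => [e]
      | some vs =>
          vs.foldl (fun acc c =>
            if (pvLookup d c).isSome then acc ++ pvExpandA d m c else acc ++ [c]) [] := rfl

lemma pvSizeA_succ (d : List (String × List String)) (m : Nat) (e : String) :
    pvSizeA d (m + 1) e =
      match pvLookup d e with
      | none => 1
      | some vs => 1 + (vs.map (pvSizeA d m)).sum := rfl

-- fuel stability for pvExpandA outside the residue: any sufficient fuel gives pvE
lemma pvExpandA_stable (d : List (String × List String)) :
    ∀ r e, e ∉ pvPeel d d.length → pvRank d e = r → ∀ n, r ≤ n →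
      pvExpandA d (n + 1) e = pvE d e := by
  intro r
  induction r using Nat.strong_induction_on with
  | _ r ih =>
    intro e hres hr n hrn
    cases hl : pvLookup d e with
    | none => simp [pvExpandA, pvE, hl]
    | some vs =>
      have hpos := pvRank_pos_of_some d e hres vs hl
      obtain ⟨k, hk⟩ : ∃ k, r = k + 1 := ⟨r - 1, by omega⟩
      obtain ⟨n', hn'⟩ : ∃ n', n = n' + 1 := ⟨n - 1, by omega⟩
      have hchild : ∀ c ∈ vs, pvExpandA d n c = pvExpandA d (k + 1) c := by
        intro c hc
        have hcres : c ∉ pvPeel d d.length := pvChild_not_res d e vs hres hl c hc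
        have hlt : pvRank d c < r := hr ▸ pvRank_child_lt d e hres vs hl c hc
        have h1 : pvExpandA d (n' + 1) c = pvE d c := ih _ hlt c hcres rfl n' (by omega)
        have h2 : pvExpandA d (k + 1) c = pvE d c := ih _ hlt c hcres rfl k (by omega)
        rw [hn', h1, h2]
      have hrank : pvRank d e + 1 = k + 2 := by omega
      rw [pvE, hrank, hn']
      rw [pvExpandA_succ d (n' + 1), pvExpandA_succ d (k + 1), hl]
      apply PySem.List.foldl_congr_mem
      intro acc c hc
      have hcc := hchild c hc
      rw [hn'] at hcc
      by_cases hs : (pvLookup d c).isSome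
      · rw [if_pos hs, if_pos hs, hcc]
      · rw [if_neg hs, if_neg hs]

-- the same stability for pvSizeA
lemma pvSizeA_stable (d : List (String × List String)) :
    ∀ r e, e ∉ pvPeel d d.length → pvRank d e = r → ∀ n, r ≤ n →
      pvSizeA d (n + 1) e = pvSize d e := by
  intro r
  induction r using Nat.strong_induction_on with
  | _ r ih =>
    intro e hres hr n hrn
    cases hl : pvLookup d e with
    | none => simp [pvSizeA, pvSize, hl]
    | some vs =>
      have hpos := pvRank_pos_of_some d e hres vs hl
      obtain ⟨k, hk⟩ : ∃ k, r = k + 1 := ⟨r - 1, by omega⟩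
      obtain ⟨n', hn'⟩ : ∃ n', n = n' + 1 := ⟨n - 1, by omega⟩
      have hchild : ∀ c ∈ vs, pvSizeA d n c = pvSizeA d (k + 1) c := by
        intro c hc
        have hcres : c ∉ pvPeel d d.length := pvChild_not_res d e vs hres hl c hc
        have hlt : pvRank d c < r := hr ▸ pvRank_child_lt d e hres vs hl c hc
        have h1 : pvSizeA d (n' + 1) c = pvSize d c := ih _ hlt c hcres rfl n' (by omega)
        have h2 : pvSizeA d (k + 1) c = pvSize d c := ih _ hlt c hcres rfl k (by omega)
        rw [hn', h1, h2]
      have hrank : pvRank d e + 1 = k + 2 := by omega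
      rw [pvSize, hrank, hn']
      rw [pvSizeA_succ d (n' + 1), pvSizeA_succ d (k + 1), hl]
      show 1 + (vs.map (pvSizeA d (n' + 1))).sum = 1 + (vs.map (pvSizeA d (k + 1))).sum
      congr 1
      apply congrArg List.sum
      apply List.map_congr_left
      intro c hc
      have hcc := hchild c hc
      rw [hn'] at hcc
      exact hcc

-- unfolding pvE / pvSize
lemma pvE_none (d : List (String × List String)) (e : String)
    (h : pvLookup d e = none) : pvE d e = [e] := by
  simp [pvE, pvExpandA, h]

lemma pvE_some (d : List (String × List String)) (e : String)
    (hres : e ∉ pvPeel d d.length) (vs : List String) (h : pvLookup d e = some vs) :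
    pvE d e = vs.flatMap (pvE d) := by
  obtain ⟨k, hk⟩ : ∃ k, pvRank d e = k + 1 :=
    ⟨pvRank d e - 1, by have := pvRank_pos_of_some d e hres vs h; omega⟩
  have hrank : pvRank d e + 1 = k + 2 := by omega
  rw [pvE, hrank, pvExpandA_succ d (k + 1), h]
  show vs.foldl (fun acc c =>
      if (pvLookup d c).isSome then acc ++ pvExpandA d (k + 1) c else acc ++ [c]) [] =
    vs.flatMap (pvE d)
  rw [PySem.List.foldl_congr_mem vs _ (fun acc c => acc ++ pvE d c) []]
  · exact PySem.List.foldl_append_eq_flatMap (pvE d) vs []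
  · intro acc c hc
    have hcres : c ∉ pvPeel d d.length := pvChild_not_res d e vs hres h c hc
    have hlt : pvRank d c < pvRank d e := pvRank_child_lt d e hres vs h c hc
    by_cases hs : (pvLookup d c).isSome
    · have : pvExpandA d (k + 1) c = pvE d c :=
        pvExpandA_stable d (pvRank d c) c hcres rfl k (by omega)
      simp [hs, this]
    · have hnone : pvLookup d c = none := Option.not_isSome_iff_eq_none.mp hs
      simp [hs, pvE_none d c hnone]

lemma pvSize_none (d : List (String × List String)) (e : String)
    (h : pvLookup d e = none) : pvSize d e = 1 := by
  simp [pvSize, pvSizeA, h]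

lemma pvSize_some (d : List (String × List String)) (e : String)
    (hres : e ∉ pvPeel d d.length) (vs : List String) (h : pvLookup d e = some vs) :
    pvSize d e = 1 + (vs.map (pvSize d)).sum := by
  obtain ⟨k, hk⟩ : ∃ k, pvRank d e = k + 1 :=
    ⟨pvRank d e - 1, by have := pvRank_pos_of_some d e hres vs h; omega⟩
  have hrank : pvRank d e + 1 = k + 2 := by omega
  rw [pvSize, hrank, pvSizeA_succ d (k + 1), h]
  show 1 + (vs.map (pvSizeA d (k + 1))).sum = 1 + (vs.map (pvSize d)).sum
  congr 1
  apply congrArg List.sum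
  apply List.map_congr_left
  intro c hc
  have hcres : c ∉ pvPeel d d.length := pvChild_not_res d e vs hres h c hc
  exact pvSizeA_stable d (pvRank d c) c hcres rfl k
    (by have := pvRank_child_lt d e hres vs h c hc; omega)

lemma pvSize_pos (d : List (String × List String)) (e : String) : 1 ≤ pvSize d e := by
  cases h : pvLookup d e with
  | none => rw [pvSize_none d e h]
  | some vs => rw [pvSize]; simp [pvSizeA, h]

-- the number of children of any key is at most the total child count S
lemma pvChildren_le_sum (d : List (String × List String)) (e : String) (vs : List String)
    (h : pvLookup d e = some vs) : vs.length ≤ (d.map (fun p => p.2.length)).sum := by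
  obtain ⟨p, hp, _, hsnd⟩ := pvLookup_mem d e vs h
  have hmem : vs.length ∈ d.map (fun p => p.2.length) :=
    List.mem_map.mpr ⟨p, hp, by rw [hsnd]⟩
  exact List.le_sum_of_mem hmem

-- the iteration count is at most (S+1)^(rank+1)
lemma pvSize_le (d : List (String × List String)) :
    ∀ r e, e ∉ pvPeel d d.length → pvRank d e ≤ r →
      pvSize d e ≤ ((d.map (fun p => p.2.length)).sum + 1) ^ (r + 1) := by
  intro r
  set S := (d.map (fun p => p.2.length)).sum with hS
  induction r with
  | zero =>
    intro e hres h0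
    have hn : pvLookup d e = none :=
      pvLookup_none_of_rank_zero d e hres (Nat.le_zero.mp h0)
    rw [pvSize_none d e hn]
    exact Nat.one_le_pow _ _ (Nat.succ_pos _)
  | succ r ih =>
    intro e hres hre
    cases hl : pvLookup d e with
    | none =>
      rw [pvSize_none d e hl]
      exact Nat.one_le_pow _ _ (Nat.succ_pos _)
    | some vs =>
      rw [pvSize_some d e hres vs hl]
      have hbound : ∀ x ∈ vs.map (pvSize d), x ≤ (S + 1) ^ (r + 1) := by
        intro x hx
        obtain ⟨c, hc, rfl⟩ := List.mem_map.mp hx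
        have hcres : c ∉ pvPeel d d.length := pvChild_not_res d e vs hres hl c hc
        have hlt : pvRank d c < pvRank d e := pvRank_child_lt d e hres vs hl c hc
        exact ih c hcres (by omega)
      have hsum : (vs.map (pvSize d)).sum ≤ vs.length * (S + 1) ^ (r + 1) := by
        calc (vs.map (pvSize d)).sum
            ≤ (vs.map (pvSize d)).length * (S + 1) ^ (r + 1) :=
              List.sum_le_card_nsmul _ _ hbound
          _ = vs.length * (S + 1) ^ (r + 1) := by simp
      have hvsS : vs.length ≤ S := pvChildren_le_sum d e vs hl
      have hpow1 : 1 ≤ (S + 1) ^ (r + 1) := Nat.one_le_pow _ _ (Nat.succ_pos _)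
      calc 1 + (vs.map (pvSize d)).sum
          ≤ 1 + S * (S + 1) ^ (r + 1) := by
            have := Nat.mul_le_mul_right ((S + 1) ^ (r + 1)) hvsS
            omega
        _ ≤ (S + 1) ^ (r + 1) + S * (S + 1) ^ (r + 1) := by omega
        _ = (S + 1) ^ (r + 2) := by ring

-- the stack loop computes the flattened expansion, given enough fuel
lemma pvLoopB_eq (d : List (String × List String)) :
    ∀ n stack acc, (∀ x ∈ stack, x ∉ pvPeel d d.length) →
      (stack.map (pvSize d)).sum ≤ n →
      pvLoopB d n stack acc = acc ++ stack.flatMap (pvE d) := by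
  intro n
  induction n with
  | zero =>
    intro stack acc _ hsum
    cases stack with
    | nil => simp [pvLoopB]
    | cons x rest =>
      exfalso
      have := pvSize_pos d x
      simp at hsum
      omega
  | succ n ih =>
    intro stack acc hres hsum
    cases stack with
    | nil => simp [pvLoopB]
    | cons x rest =>
      have hxres : x ∉ pvPeel d d.length := hres x (by simp)
      have hrest : ∀ y ∈ rest, y ∉ pvPeel d d.length := fun y hy => hres y (by simp [hy])
      cases hl : pvLookup d x with
      | none =>
        have hx : pvSize d x = 1 := pvSize_none d x hl
        have : (rest.map (pvSize d)).sum ≤ n := by simp [hx] at hsum; omega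
        simp only [pvLoopB, hl]
        rw [ih rest (acc ++ [x]) hrest this]
        simp [pvE_none d x hl]
      | some vs =>
        have hx : pvSize d x = 1 + (vs.map (pvSize d)).sum := pvSize_some d x hxres vs hl
        have hfuel : ((vs ++ rest).map (pvSize d)).sum ≤ n := by
          simp only [List.map_append, List.sum_append]
          simp [hx] at hsum
          omega
        have hall : ∀ y ∈ vs ++ rest, y ∉ pvPeel d d.length := by
          intro y hy
          rcases List.mem_append.mp hy with hv | hr
          · exact pvChild_not_res d x vs hxres hl y hv
          · exact hrest y hr
        simp only [pvLoopB, hl]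
        rw [ih (vs ++ rest) acc hall hfuel]
        simp [pvE_some d x hxres vs hl]

-- ===== VERDICT (by name: the statement is the Claim_ definition above) =====
theorem expand_to_primitives_py_spec : Claim_equal_expand_to_primitives_py := by
  intro e d _hdom hpre
  have hres : e ∉ pvPeel d d.length := hpre
  show expand_to_primitives_py e d = expand_to_primitives_py_alt e d
  have hA : expand_to_primitives_py e d = pvE d e := by
    unfold expand_to_primitives_py
    exact pvExpandA_stable d (pvRank d e) e hres rfl d.length (pvRank_le d e hres)
  have hB : expand_to_primitives_py_alt e d = pvE d e := by
    unfold expand_to_primitives_py_alt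
    have hfuel : ([e].map (pvSize d)).sum ≤
        ((d.map (fun p => p.2.length)).sum + 1) ^ (d.length + 1) := by
      simp only [List.map_cons, List.map_nil, List.sum_cons, List.sum_nil, Nat.add_zero]
      calc pvSize d e
          ≤ ((d.map (fun p => p.2.length)).sum + 1) ^ (pvRank d e + 1) :=
            pvSize_le d (pvRank d e) e hres le_rfl
        _ ≤ ((d.map (fun p => p.2.length)).sum + 1) ^ (d.length + 1) :=
            Nat.pow_le_pow_right (by omega) (by have := pvRank_le d e hres; omega)
    rw [pvLoopB_eq d _ [e] [] (by intro x hx; simp at hx; rwa [hx]) hfuel]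
    simp
  rw [hA, hB]
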